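-- pv_equiv track=rewrite | github.com/qweLty0/ai-mastery-baran | tekstil-lead-finder/email_tools/email_finder.py | _prioritize_emails
-- ===== SOURCE A (Python) =====
-- from typing import List, Dict, Optional, Tuple
--
-- def _prioritize_emails(emails: List[str]) -> List[str]:
--     """
--     Sort emails by relevance for B2B outreach
--     Priority: sales/export/import > info/contact > personal
--     """
--     priority_prefixes = [
--         'export', 'import', 'sales', 'purchasing', 'procurement',
--         'buyer', 'orders', 'inquiry', 'info', 'contact', 'hello'
--     ]
--
--     def get_priority(email: str) -> int:
--         prefix = email.split('@')[0].lower()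
--         for i, p in enumerate(priority_prefixes):
--             if p in prefix:
--                 return i
--         return len(priority_prefixes)
--
--     return sorted(emails, key=get_priority)
-- ===== SOURCE B (Python) =====
-- from typing import List
--
-- def _prioritize_emails(emails: List[str]) -> List[str]:
--     """Group-by-priority: 12 filtering passes concatenated in ascending priority order (stable)."""
--     prefixes = [
--         'export', 'import', 'sales', 'purchasing', 'procurement',
--         'buyer', 'orders', 'inquiry', 'info', 'contact', 'hello'
--     ]
--
--     def priority(email: str) -> int:
--         local = email.split('@')[0].lower()
--         hits = [i for i, p in enumerate(prefixes) if p in local]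
--         return hits[0] if hits else len(prefixes)
--
--     return [e for k in range(12) for e in emails if priority(e) == k]
-- ===== Notes on version B (the rewrite author's own statement) =====
-- stated objective: alternative
-- what changed: Replaces the comparison-based sorted(key=...) call with a stable group-by: for each priority class 0..11 in order, a filtering pass collects the emails of that class and the 12 groups are concatenated; the helper computes priority as the first index of a list of matching prefixes instead of a loop with early return.
import Mathlib
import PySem

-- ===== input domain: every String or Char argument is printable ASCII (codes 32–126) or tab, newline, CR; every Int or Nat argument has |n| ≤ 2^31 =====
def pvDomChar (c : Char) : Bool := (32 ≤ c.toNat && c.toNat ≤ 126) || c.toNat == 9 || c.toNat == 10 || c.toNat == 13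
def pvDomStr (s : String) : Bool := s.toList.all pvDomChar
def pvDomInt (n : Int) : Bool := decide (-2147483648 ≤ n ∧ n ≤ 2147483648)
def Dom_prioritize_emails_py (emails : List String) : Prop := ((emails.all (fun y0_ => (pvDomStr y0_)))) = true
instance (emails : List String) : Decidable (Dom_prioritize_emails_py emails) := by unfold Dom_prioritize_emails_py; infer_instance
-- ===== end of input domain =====

-- B replaces the sorted(key=...) call with a stable group-by: 12 ascending filtering passes concatenated; alternative decomposition, same result.

-- ===== PORT A =====
def pvPrefixes : List String :=
  ["export", "import", "sales", "purchasing", "procurement",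
   "buyer", "orders", "inquiry", "info", "contact", "hello"]

-- the 'for i, p in enumerate(...): if p in prefix: return i' loop; falls through to len(priority_prefixes)
def pvPrioLoop (pre : String) : List (Int × String) → Int
  | [] => (pvPrefixes.length : Int)
  | (i, p) :: rest => if PySem.Str.isIn p pre then i else pvPrioLoop pre rest

def pvGetPriority (email : String) : Int :=
  let pre := PySem.Str.lower (((PySem.Str.split? email "@").getD []).headD "")
  pvPrioLoop pre (PySem.List.enumerate pvPrefixes)

def prioritize_emails_py (emails : List String) : List String :=
  PySem.List.sorted emails pvGetPriority

-- ===== PORT B =====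
def altPrefixes : List String :=
  ["export", "import", "sales", "purchasing", "procurement",
   "buyer", "orders", "inquiry", "info", "contact", "hello"]

-- hits = [i for i, p in enumerate(prefixes) if p in local]; return hits[0] if hits else len(prefixes)
def altPriority (email : String) : Int :=
  let loc := PySem.Str.lower (((PySem.Str.split? email "@").getD []).headD "")
  let hits := ((PySem.List.enumerate altPrefixes).filter
                 (fun q => PySem.Str.isIn q.2 loc)).map (fun q => q.1)
  match hits with
  | [] => (altPrefixes.length : Int)
  | h :: _ => h

-- [e for k in range(12) for e in emails if priority(e) == k]
def prioritize_emails_py_alt (emails : List String) : List String :=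
  (PySem.List.pyRange 0 12 1).flatMap
    (fun k => emails.filter (fun e => altPriority e = k))

-- ===== PRECONDITION & SPEC =====
def Spec_prioritize_emails_py (emails : List String) (out : List String) : Prop := out = prioritize_emails_py_alt emails
instance (emails : List String) (out : List String) : Decidable (Spec_prioritize_emails_py emails out) := by unfold Spec_prioritize_emails_py; infer_instance

-- ===== CLAIM (what is proved, stated in full; the proofs are below) =====
def Claim_equal_prioritize_emails_py : Prop := ∀ (emails : List String), Dom_prioritize_emails_py emails → Spec_prioritize_emails_py emails (prioritize_emails_py emails)

-- ===== LEMMAS AND PROOFS =====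

-- A's early-return loop equals B's filter-then-head over the same pair list
theorem pvPrioLoop_eq_filter (pre : String) (l : List (Int × String)) :
    pvPrioLoop pre l
    = (match (l.filter (fun q => PySem.Str.isIn q.2 pre)).map (fun q => q.1) with
       | [] => (pvPrefixes.length : Int)
       | h :: _ => h) := by
  induction l with
  | nil => rfl
  | cons q rest ih =>
    obtain ⟨i, p⟩ := q
    cases h : PySem.Str.isIn p pre with
    | true =>
      simp only [pvPrioLoop, List.filter_cons, h, if_true, List.map_cons]
    | false =>
      simp only [pvPrioLoop, List.filter_cons, h, if_false, Bool.false_eq_true, ih]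

-- the two priority helpers agree
theorem altPriority_eq (email : String) : altPriority email = pvGetPriority email := by
  unfold altPriority pvGetPriority
  rw [pvPrioLoop_eq_filter]
  simp only [altPrefixes, pvPrefixes]

-- the loop returns a listed index or the prefix count 11
theorem pvPrioLoop_bounds (pre : String) (l : List (Int × String))
    (h : ∀ q ∈ l, 0 ≤ q.1 ∧ q.1 ≤ 11) :
    0 ≤ pvPrioLoop pre l ∧ pvPrioLoop pre l ≤ 11 := by
  induction l with
  | nil => simp [pvPrioLoop, pvPrefixes]
  | cons q t ih =>
    obtain ⟨i, p⟩ := q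
    simp only [pvPrioLoop]
    split_ifs
    · exact h (i, p) (by simp)
    · exact ih (fun q hq => h q (by simp [hq]))

-- the priority is always in [0, 11]
theorem pvGetPriority_bounds (email : String) :
    0 ≤ pvGetPriority email ∧ pvGetPriority email ≤ 11 := by
  unfold pvGetPriority
  apply pvPrioLoop_bounds
  intro q hq
  rcases (PySem.List.mem_enumerate_iff _ _ _).mp hq with ⟨k, hk, rfl⟩
  have : pvPrefixes.length = 11 := by rfl
  constructor
  · simp
  · simp
    omega

-- the canonical "grouped by priority" form both programs compute
def pvCanon (emails : List String) : List String :=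
  (List.range 12).flatMap (fun (i : Nat) => emails.filter (fun e => pvGetPriority e = (i : Int)))

-- inserting x after a block whose elements are never to be inserted before
theorem insertBy_append_left {α : Type} (before : α → α → Bool) (x : α)
    (as bs : List α) (h : ∀ a ∈ as, before x a = false) :
    PySem.List.insertBy before x (as ++ bs) = as ++ PySem.List.insertBy before x bs := by
  induction as with
  | nil => simp
  | cons a t ih =>
    simp only [List.cons_append, PySem.List.insertBy, h a (by simp)]
    simp [ih (fun a ha => h a (by simp [ha]))]

-- inserting x in front of a block it goes before (head decides; empty is [x])
theorem insertBy_front {α : Type} (before : α → α → Bool) (x : α)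
    (bs : List α) (h : ∀ a ∈ bs, before x a = true) :
    PySem.List.insertBy before x bs = x :: bs := by
  cases bs with
  | nil => rfl
  | cons b t => simp [PySem.List.insertBy, h b (by simp)]

-- key step: inserting x into a flatMap of priority buckets appends x to its own bucket
theorem insertBy_flatMap (I : List Nat) (F : Nat → List String) (x : String) (k : Nat)
    (hI : I.Pairwise (· < ·)) (hk : k ∈ I) (hx : pvGetPriority x = (k : Int))
    (hF : ∀ i ∈ I, ∀ e ∈ F i, pvGetPriority e = (i : Int)) :
    PySem.List.insertBy (fun a b => decide (pvGetPriority a < pvGetPriority b)) x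
      (I.flatMap F)
    = I.flatMap (fun i => F i ++ if i = k then [x] else []) := by
  induction I with
  | nil => cases hk
  | cons i I' ih =>
    have hpw := (List.pairwise_cons.mp hI).1
    have hI' := (List.pairwise_cons.mp hI).2
    by_cases hik : i = k
    · subst hik
      have hnot : ∀ i' ∈ I', i' ≠ i := fun i' hi' => Nat.ne_of_gt (hpw i' hi')
      rw [List.flatMap_cons,
        insertBy_append_left _ _ _ _ (fun a ha => by
          have := hF i (by simp) a ha
          simp [this, hx]),
        insertBy_front _ _ _ (fun a ha => by
          rcases List.mem_flatMap.mp ha with ⟨j, hj, haj⟩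
          have := hF j (by simp [hj]) a haj
          simp [this, hx]
          exact_mod_cast hpw j hj)]
      rw [List.flatMap_cons]
      have : I'.flatMap (fun j => F j ++ if j = i then [x] else []) = I'.flatMap F :=
        List.flatMap_congr (fun j hj => by simp [hnot j hj])
      simp [this]
    · have hk' : k ∈ I' := by
        cases hk with
        | head => exact absurd rfl hik
        | tail _ h => exact h
      have hik2 : i < k := hpw k hk'
      rw [List.flatMap_cons,
        insertBy_append_left _ _ _ _ (fun a ha => by
          have := hF i (by simp) a ha
          simp [this, hx]
          exact_mod_cast Nat.le_of_lt hik2),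
        ih hI' hk' (fun j hj e he => hF j (by simp [hj]) e he)]
      simp [List.flatMap_cons, hik]

-- the toNat'd priority is in range 12 and casts back
theorem pvKey_toNat (x : String) :
    (pvGetPriority x).toNat < 12 ∧ pvGetPriority x = ((pvGetPriority x).toNat : Int) := by
  have h := pvGetPriority_bounds x
  constructor
  · omega
  · exact (Int.toNat_of_nonneg h.1).symm

-- appending one email to the canonical form appends it to its bucket
set_option maxHeartbeats 2000000 in
theorem canon_append (es : List String) (x : String) :
    pvCanon (es ++ [x])
    = (List.range 12).flatMap
        (fun (i : Nat) => es.filter (fun e => pvGetPriority e = (i : Int))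
          ++ if i = (pvGetPriority x).toNat then [x] else []) := by
  unfold pvCanon
  refine List.flatMap_congr (l := List.range 12) fun i hi => ?_
  rw [List.filter_append]
  congr 1
  obtain ⟨hk, hcast⟩ := pvKey_toNat x
  rw [List.filter_singleton]
  by_cases h : i = (pvGetPriority x).toNat
  · rw [decide_eq_true (show pvGetPriority x = (i : Int) by rw [h]; exact hcast),
      cond_true, if_pos h]
  · have hne : pvGetPriority x ≠ (i : Int) := by omega
    rw [decide_eq_false hne, cond_false, if_neg h]

-- A computes the canonical form
set_option maxHeartbeats 2000000 in
theorem portA_eq_canon (emails : List String) : prioritize_emails_py emails = pvCanon emails := by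
  unfold prioritize_emails_py
  induction emails using List.reverseRecOn with
  | nil => rfl
  | append_singleton es x ih =>
    rw [PySem.List.sorted_eq_foldl_insertBy, List.foldl_append,
      ← PySem.List.sorted_eq_foldl_insertBy, ih]
    obtain ⟨hk, hcast⟩ := pvKey_toNat x
    simp only [List.foldl_cons, List.foldl_nil]
    rw [canon_append]
    exact insertBy_flatMap (List.range 12) _ x (pvGetPriority x).toNat
      (List.pairwise_lt_range)
      (List.mem_range.mpr hk) hcast
      (fun i _ e he => by simpa using (List.mem_filter.mp he).2)

-- range(12) as Python ints is the cast of List.range 12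
theorem pyRange12 : PySem.List.pyRange 0 12 1 = (List.range 12).map Int.ofNat := by
  decide

-- flatMap over a mapped list
theorem flatMapMapAux {α β γ : Type} (f : α → β) (l : List α) (g : β → List γ) :
    (l.map f).flatMap g = l.flatMap (fun a => g (f a)) := by
  induction l with
  | nil => rfl
  | cons a t ih => simp [ih]

-- B computes the canonical form
theorem portB_eq_canon (emails : List String) : prioritize_emails_py_alt emails = pvCanon emails := by
  unfold prioritize_emails_py_alt pvCanon
  rw [pyRange12, flatMapMapAux]
  exact List.flatMap_congr (fun i _ => by simp [altPriority_eq])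

-- ===== VERDICT (by name: the statement is the Claim_ definition above) =====
theorem prioritize_emails_py_spec : Claim_equal_prioritize_emails_py := by
  intro emails _
  unfold Spec_prioritize_emails_py
  rw [portA_eq_canon, portB_eq_canon]
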